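-- pv_equiv track=rewrite | github.com/COSC-499-W2025/capstone-project-team-20 | utils/timeline_builder.py | _normalized_project_skills
-- ===== SOURCE A (Python) =====
-- from typing import Any, Iterable, Dict, List, Tuple, Optional
--
-- def _normalized_project_skills(raw_skills: Any) -> List[str]:
--     """
--     Normalize a project's skills into a sorted, deduplicated list of strings.
--
--     Behaviour:
--     - Accepts None or any iterable of values.
--     - Only string values are kept; non-strings (e.g. numbers) are ignored.
--     - Strings are stripped; empty entries are ignored.
--     - Skills are deduplicated *case-insensitively*, but casing from the first
--       occurrence is preserved.
--     - The returned list is sorted case-insensitively.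
--     """
--     if not raw_skills:
--         return []
--
--     result: Dict[str, str] = {}  # lowercased -> original casing
--     try:
--         iterable = list(raw_skills)
--     except TypeError:
--         iterable = [raw_skills]
--
--     for value in iterable:
--         if value is None or not isinstance(value, str):
--             continue
--         s = value.strip()
--         if not s:
--             continue
--         key = s.lower()
--         if key not in result:
--             result[key] = s
--
--     return [result[k] for k in sorted(result.keys())]
-- ===== SOURCE B (Python) =====
-- from typing import Any, List
--
--
-- def _normalized_project_skills(raw_skills: Any) -> List[str]:
--     """Sort-then-scan reimplementation: collect all valid stripped strings,
--     stable-sort them case-insensitively, then keep the first of each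
--     equal-lowercase run in a single pass (no dict of lowercased keys)."""
--     if not raw_skills:
--         return []
--
--     try:
--         iterable = list(raw_skills)
--     except TypeError:
--         iterable = [raw_skills]
--
--     vals: List[str] = []
--     for v in iterable:
--         if isinstance(v, str):
--             s = v.strip()
--             if s:
--                 vals.append(s)
--
--     vals.sort(key=str.lower)
--
--     out: List[str] = []
--     prev = None
--     for s in vals:
--         k = s.lower()
--         if k != prev:
--             out.append(s)
--             prev = k
--     return out
-- ===== Notes on version B (the rewrite author's own statement) =====
-- stated objective: alternative
-- what changed: Replaces the lowercased-key dict (insert-if-absent, then sort the keys and look each one back up) by a flat list of all valid stripped strings that is stable-sorted with key=str.lower and deduplicated in one adjacent-run pass, relying on sort stability to keep the first occurrence's casing.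
import Mathlib
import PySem

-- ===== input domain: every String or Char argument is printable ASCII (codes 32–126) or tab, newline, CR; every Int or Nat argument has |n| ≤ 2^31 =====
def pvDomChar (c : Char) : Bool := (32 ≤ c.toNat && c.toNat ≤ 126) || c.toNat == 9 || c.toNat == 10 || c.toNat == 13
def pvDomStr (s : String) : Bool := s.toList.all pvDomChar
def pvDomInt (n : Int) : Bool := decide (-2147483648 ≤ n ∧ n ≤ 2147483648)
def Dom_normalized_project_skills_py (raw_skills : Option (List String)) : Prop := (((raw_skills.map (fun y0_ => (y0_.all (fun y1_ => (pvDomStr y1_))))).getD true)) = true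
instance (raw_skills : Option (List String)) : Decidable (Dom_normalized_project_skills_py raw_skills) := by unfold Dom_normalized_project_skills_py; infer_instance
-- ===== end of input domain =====

-- B replaces A's lowercased-key dict + key sort + lookups by stable-sorting the kept strings
-- case-insensitively and deduplicating adjacent equal-lowercase runs in one pass (objective: alternative).

-- ===== PORT A =====
-- Port of A: a dict lowercased -> first original casing, then the sorted keys are looked up.
-- (On Option (List String) every element is a string, so the `value is None or not isinstance(value, str)`
-- guard never fires; the `try: list(raw_skills)` never raises for a list.)
def normalized_project_skills_py (raw_skills : Option (List String)) : List String :=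
  match raw_skills with
  | none => []
  | some xs =>
      if xs = [] then []
      else
        let result : PySem.Dict String String :=
          xs.foldl (fun result value =>
            let s := PySem.Str.strip value
            if s = "" then result
            else
              let k := PySem.Str.lower s
              if result.contains k then result else result.insert k s)
            PySem.Dict.empty
        (PySem.List.sorted result.keys (fun k => k)).map (fun k => result.getD k "")

-- ===== PORT B =====
-- Port of B: collect valid stripped strings, stable-sort by lower, keep first of each equal-lower run.
def normalized_project_skills_py_alt (raw_skills : Option (List String)) : List String :=
  match raw_skills with
  | none => []
  | some xs =>
      if xs = [] then []
      else
        let vals : List String :=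
          xs.foldl (fun vals v =>
            let s := PySem.Str.strip v
            if s = "" then vals else vals ++ [s]) []
        let srt := PySem.List.sorted vals PySem.Str.lower
        (srt.foldl (fun (st : List String × Option String) s =>
            let k := PySem.Str.lower s
            if some k ≠ st.2 then (st.1 ++ [s], some k) else st)
          ([], none)).1

-- ===== PRECONDITION & SPEC =====
def Spec_normalized_project_skills_py (raw_skills : Option (List String)) (out : List String) : Prop := out = normalized_project_skills_py_alt raw_skills
instance (raw_skills : Option (List String)) (out : List String) : Decidable (Spec_normalized_project_skills_py raw_skills out) := by unfold Spec_normalized_project_skills_py; infer_instance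

-- ===== CLAIM (what is proved, stated in full; the proofs are below) =====
def Claim_equal_normalized_project_skills_py : Prop := ∀ (raw_skills : Option (List String)), Dom_normalized_project_skills_py raw_skills → Spec_normalized_project_skills_py raw_skills (normalized_project_skills_py raw_skills)

-- ===== LEMMAS AND PROOFS =====

-- the cleaned values: all stripped nonempty strings, in order
def pvClean (xs : List String) : List String :=
  xs.filterMap (fun v => if PySem.Str.strip v = "" then none else some (PySem.Str.strip v))

-- B's dedup pass as a structural recursion
def pvG : Option String → List String → List String
  | _, [] => []
  | prev, s :: t =>
      if some (PySem.Str.lower s) ≠ prev then s :: pvG (some (PySem.Str.lower s)) t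
      else pvG prev t

-- B's vals loop builds pvClean
lemma pvVals_eq (xs : List String) (acc : List String) :
    xs.foldl (fun vals v =>
      let s := PySem.Str.strip v
      if s = "" then vals else vals ++ [s]) acc = acc ++ pvClean xs := by
  induction xs generalizing acc with
  | nil => simp [pvClean]
  | cons v t ih =>
      simp only [List.foldl_cons, pvClean, List.filterMap_cons]
      by_cases h : PySem.Str.strip v = "" <;> simp [h, ih, pvClean]

-- A's dict loop over xs equals the same loop, without stripping, over pvClean xs
lemma pvDict_eq (xs : List String) (d : PySem.Dict String String) :
    xs.foldl (fun result value =>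
      let s := PySem.Str.strip value
      if s = "" then result
      else
        let k := PySem.Str.lower s
        if result.contains k then result else result.insert k s) d
    = (pvClean xs).foldl (fun result s =>
        if result.contains (PySem.Str.lower s) then result
        else result.insert (PySem.Str.lower s) s) d := by
  induction xs generalizing d with
  | nil => simp [pvClean]
  | cons v t ih =>
      simp only [List.foldl_cons, pvClean, List.filterMap_cons]
      by_cases h : PySem.Str.strip v = "" <;> simp [h, ih, pvClean]

-- lookup in the first-occurrence dict
lemma pvDict_get? (vs : List String) (d : PySem.Dict String String) (k : String) :
    (vs.foldl (fun result s =>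
        if result.contains (PySem.Str.lower s) then result
        else result.insert (PySem.Str.lower s) s) d).get? k
    = (d.get? k).or (vs.find? (fun s => PySem.Str.lower s == k)) := by
  induction vs generalizing d with
  | nil => simp only [List.foldl_nil, List.find?_nil, Option.or_none]
  | cons s t ih =>
      simp only [List.foldl_cons]
      by_cases hks : PySem.Str.lower s = k
      · rw [List.find?_cons_of_pos (by simpa using hks)]
        by_cases hc : d.contains (PySem.Str.lower s) = true
        · rw [if_pos hc, ih]
          have : (d.get? k).isSome := by
            rw [← PySem.Dict.contains_eq_isSome_get?, ← hks]; exact hc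
          obtain ⟨v, hv⟩ := Option.isSome_iff_exists.mp this
          simp [hv]
        · rw [if_neg hc, ih]
          have hnone : d.get? k = none := by
            rw [← hks]
            have := PySem.Dict.contains_eq_isSome_get? d (PySem.Str.lower s)
            simp only [hc, Bool.false_eq] at this
            exact Option.not_isSome_iff_eq_none.mp (by simp [← this])
          rw [hks, PySem.Dict.get?_insert_self]
          simp [hnone]
      · rw [List.find?_cons_of_neg (by simpa using hks)]
        by_cases hc : d.contains (PySem.Str.lower s) = true
        · rw [if_pos hc, ih]
        · rw [if_neg hc, ih, PySem.Dict.get?_insert_of_ne d s (Ne.symm hks)]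

-- keys of the first-occurrence dict
lemma pvDict_keys (vs : List String) (d : PySem.Dict String String) :
    (vs.foldl (fun result s =>
        if result.contains (PySem.Str.lower s) then result
        else result.insert (PySem.Str.lower s) s) d).keys
    = PySem.Set.update d.keys (vs.map PySem.Str.lower) := by
  induction vs generalizing d with
  | nil => simp [PySem.Set.update]
  | cons s t ih =>
      simp only [List.foldl_cons, List.map_cons, PySem.Set.update]
      by_cases hc : d.contains (PySem.Str.lower s) = true
      · rw [if_pos hc, ih]
        have hmem : PySem.Str.lower s ∈ d.keys := by
          simp only [PySem.Dict.contains, List.any_eq_true] at hc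
          obtain ⟨p, hp, he⟩ := hc
          have hfst : p.1 = PySem.Str.lower s := by simpa using he
          exact hfst ▸ List.mem_map_of_mem hp
        have hadd : PySem.Set.add d.keys (PySem.Str.lower s) = d.keys := by
          simp [PySem.Set.add, hmem]
        simp [PySem.Set.update, hadd]
      · rw [if_neg hc, ih]
        have hkeys : (d.insert (PySem.Str.lower s) s).keys = d.keys ++ [PySem.Str.lower s] := by
          simp [PySem.Dict.insert, hc, PySem.Dict.keys]
        have hnmem : PySem.Str.lower s ∉ d.keys := by
          intro hmem
          apply hc
          simp only [PySem.Dict.keys, List.mem_map] at hmem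
          obtain ⟨p, hp, hfst⟩ := hmem
          simp only [PySem.Dict.contains, List.any_eq_true]
          exact ⟨p, hp, by simp [hfst]⟩
        have hadd : PySem.Set.add d.keys (PySem.Str.lower s) = d.keys ++ [PySem.Str.lower s] := by
          simp [PySem.Set.add, hnmem]
        simp [PySem.Set.update, hkeys, hadd]

-- insertBy by (lower <) preserves Pairwise (lower ≤)
lemma pvInsertBy_pairwise (x : String) (l : List String)
    (h : l.Pairwise (fun a b => PySem.Str.lower a ≤ PySem.Str.lower b)) :
    (PySem.List.insertBy (fun a b => decide (PySem.Str.lower a < PySem.Str.lower b)) x l).Pairwise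
      (fun a b => PySem.Str.lower a ≤ PySem.Str.lower b) := by
  induction l with
  | nil => simp [PySem.List.insertBy]
  | cons y ys ih =>
      rw [List.pairwise_cons] at h
      obtain ⟨hy, hys⟩ := h
      simp only [PySem.List.insertBy]
      by_cases hlt : PySem.Str.lower x < PySem.Str.lower y
      · simp only [hlt, decide_true, if_true]
        refine List.Pairwise.cons ?_ (List.Pairwise.cons hy hys)
        intro z hz
        rcases List.mem_cons.mp hz with rfl | hz
        · exact le_of_lt hlt
        · exact le_trans (le_of_lt hlt) (hy z hz)
      · simp only [hlt, decide_false, Bool.false_eq_true, if_false]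
        refine List.Pairwise.cons ?_ (ih hys)
        intro z hz
        rcases (PySem.List.mem_insertBy _ _ _ _).mp hz with rfl | hz
        · exact le_of_not_gt hlt
        · exact hy z hz
  
-- inserting into a (lower ≤)-sorted list puts x after every element with the same lower
lemma pvInsertBy_find? (x : String) (l : List String) (k : String)
    (h : l.Pairwise (fun a b => PySem.Str.lower a ≤ PySem.Str.lower b)) :
    (PySem.List.insertBy (fun a b => decide (PySem.Str.lower a < PySem.Str.lower b)) x l).find?
        (fun v => PySem.Str.lower v == k)
    = (l.find? (fun v => PySem.Str.lower v == k)).or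
        (if PySem.Str.lower x == k then some x else none) := by
  induction l with
  | nil =>
      simp only [PySem.List.insertBy, List.find?_nil, Option.none_or]
      by_cases hx : PySem.Str.lower x = k
      · rw [List.find?_cons_of_pos (by simpa using hx)]; simp [hx]
      · rw [List.find?_cons_of_neg (by simpa using hx)]; simp [hx]
  | cons y ys ih =>
      rw [List.pairwise_cons] at h
      obtain ⟨hy, hys⟩ := h
      simp only [PySem.List.insertBy]
      by_cases hlt : PySem.Str.lower x < PySem.Str.lower y
      · simp only [hlt, decide_true, if_true]
        by_cases hx : PySem.Str.lower x = k
        · have hnone : (y :: ys).find? (fun v => PySem.Str.lower v == k) = none := by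
            rw [List.find?_eq_none]
            intro z hz hzk
            have hk : PySem.Str.lower z = k := by simpa using hzk
            have hle : PySem.Str.lower y ≤ PySem.Str.lower z := by
              rcases List.mem_cons.mp hz with rfl | hz
              · exact le_refl _
              · exact hy z hz
            rw [hk, ← hx] at hle
            exact absurd (lt_of_lt_of_le hlt hle) (lt_irrefl _)
          rw [List.find?_cons_of_pos (p := fun v => PySem.Str.lower v == k) (by simpa using hx), hnone]
          simp [hx]
        · rw [List.find?_cons_of_neg (p := fun v => PySem.Str.lower v == k) (by simpa using hx)]
          simp [hx]
      · simp only [hlt, decide_false, Bool.false_eq_true, if_false]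
        by_cases hyk : PySem.Str.lower y = k
        · rw [List.find?_cons_of_pos (p := fun v => PySem.Str.lower v == k) (by simpa using hyk),
              List.find?_cons_of_pos (p := fun v => PySem.Str.lower v == k) (by simpa using hyk)]
          simp
        · rw [List.find?_cons_of_neg (p := fun v => PySem.Str.lower v == k) (by simpa using hyk),
              List.find?_cons_of_neg (p := fun v => PySem.Str.lower v == k) (by simpa using hyk)]
          exact ih hys

-- STABILITY of the insertion sort, in find? form
lemma pvFoldl_ins_find? (l : List String) (acc : List String) (k : String)
    (h : acc.Pairwise (fun a b => PySem.Str.lower a ≤ PySem.Str.lower b)) :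
    (l.foldl (fun acc x =>
        PySem.List.insertBy (fun a b => decide (PySem.Str.lower a < PySem.Str.lower b)) x acc) acc).find?
        (fun v => PySem.Str.lower v == k)
    = (acc.find? (fun v => PySem.Str.lower v == k)).or (l.find? (fun v => PySem.Str.lower v == k)) := by
  induction l generalizing acc with
  | nil => simp
  | cons x t ih =>
      simp only [List.foldl_cons]
      rw [ih _ (pvInsertBy_pairwise x acc h), pvInsertBy_find? x acc k h]
      rw [Option.or_assoc]
      congr 1
      by_cases hx : PySem.Str.lower x = k
      · rw [List.find?_cons_of_pos (p := fun v => PySem.Str.lower v == k) (by simpa using hx)]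
        simp [hx]
      · rw [List.find?_cons_of_neg (p := fun v => PySem.Str.lower v == k) (by simpa using hx)]
        simp [hx]

-- sorted(vals, key=lower) keeps the first occurrence of each lowercase key first
lemma pvSorted_find? (vs : List String) (k : String) :
    (PySem.List.sorted vs PySem.Str.lower).find? (fun v => PySem.Str.lower v == k)
    = vs.find? (fun v => PySem.Str.lower v == k) := by
  rw [PySem.List.sorted_eq_foldl_insertBy]
  simpa using pvFoldl_ins_find? vs [] k (by simp)

-- B's dedup loop is pvG
lemma pvDedup_foldl (S : List String) (out : List String) (prev : Option String) :
    (S.foldl (fun (st : List String × Option String) s =>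
        let k := PySem.Str.lower s
        if some k ≠ st.2 then (st.1 ++ [s], some k) else st) (out, prev)).1
    = out ++ pvG prev S := by
  induction S generalizing out prev with
  | nil => simp [pvG]
  | cons s t ih =>
      rw [List.foldl_cons]
      by_cases hp : some (PySem.Str.lower s) = prev
      · rw [show (let k := PySem.Str.lower s
              if some k ≠ (out, prev).2 then ((out, prev).1 ++ [s], some k) else (out, prev))
              = ((out, prev) : List String × Option String) from by simp [hp]]
        rw [ih, show pvG prev (s :: t) = pvG prev t from by simp [pvG, hp]]
      · rw [show (let k := PySem.Str.lower s
              if some k ≠ (out, prev).2 then ((out, prev).1 ++ [s], some k) else (out, prev))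
              = ((out ++ [s], some (PySem.Str.lower s)) : List String × Option String) from by
            simp [hp]]
        rw [ih, show pvG prev (s :: t) = s :: pvG (some (PySem.Str.lower s)) t from by
          simp [pvG, hp]]
        simp

-- every element of pvG is the first element of S with its lowercase key
lemma pvG_spec (S : List String) (prev : Option String)
    (hs : S.Pairwise (fun a b => PySem.Str.lower a ≤ PySem.Str.lower b))
    (hp : ∀ p, prev = some p → ∀ v ∈ S, p ≤ PySem.Str.lower v) :
    ∀ b ∈ pvG prev S, prev ≠ some (PySem.Str.lower b) ∧
      S.find? (fun v => PySem.Str.lower v == PySem.Str.lower b) = some b := by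
  induction S generalizing prev with
  | nil => simp [pvG]
  | cons s t ih =>
      rw [List.pairwise_cons] at hs
      obtain ⟨hle, ht⟩ := hs
      intro b hb
      simp only [pvG] at hb
      by_cases hc : some (PySem.Str.lower s) = prev
      · rw [if_neg (by simpa using hc)] at hb
        have hp' : ∀ p, prev = some p → ∀ v ∈ t, p ≤ PySem.Str.lower v :=
          fun p h v hv => hp p h v (List.mem_cons_of_mem _ hv)
        obtain ⟨hne, hfind⟩ := ih prev ht hp' b hb
        have hsb : PySem.Str.lower s ≠ PySem.Str.lower b := by
          intro h; exact hne (by rw [← hc, h])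
        refine ⟨hne, ?_⟩
        rw [List.find?_cons_of_neg (by simpa using hsb)]
        exact hfind
      · rw [if_pos (by simpa using hc)] at hb
        rcases List.mem_cons.mp hb with rfl | hb
        · refine ⟨fun h => hc h.symm, ?_⟩
          rw [List.find?_cons_of_pos (by simp)]
        · have hp' : ∀ p, some (PySem.Str.lower s) = some p → ∀ v ∈ t, p ≤ PySem.Str.lower v := by
            intro p h v hv
            rw [Option.some_inj] at h
            subst h; exact hle v hv
          obtain ⟨hne, hfind⟩ := ih (some (PySem.Str.lower s)) ht hp' b hb
          have hsb : PySem.Str.lower s ≠ PySem.Str.lower b := fun h => hne (by rw [h])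
          refine ⟨?_, ?_⟩
          · intro h
            obtain ⟨p, rfl⟩ : ∃ p, prev = some p := ⟨PySem.Str.lower b, h⟩
            have hpk : p = PySem.Str.lower b := by simpa using h
            have h1 : p ≤ PySem.Str.lower s := hp p rfl s (List.mem_cons_self)
            have h2 : PySem.Str.lower s ≤ PySem.Str.lower b :=
              hle b (List.mem_of_find?_eq_some hfind)
            rw [hpk] at h1
            exact hsb (le_antisymm h2 h1)
          · rw [List.find?_cons_of_neg (by simpa using hsb)]
            exact hfind

-- lowercase keys appearing in pvG
lemma pvG_mem_key (S : List String) (prev : Option String) (k : String)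
    (hs : S.Pairwise (fun a b => PySem.Str.lower a ≤ PySem.Str.lower b))
    (hp : ∀ p, prev = some p → ∀ v ∈ S, p ≤ PySem.Str.lower v) :
    k ∈ (pvG prev S).map PySem.Str.lower ↔ k ∈ S.map PySem.Str.lower ∧ prev ≠ some k := by
  induction S generalizing prev with
  | nil => simp [pvG]
  | cons s t ih =>
      rw [List.pairwise_cons] at hs
      obtain ⟨hle, ht⟩ := hs
      simp only [pvG]
      by_cases hc : some (PySem.Str.lower s) = prev
      · rw [if_neg (by simpa using hc)]
        have hp' : ∀ p, prev = some p → ∀ v ∈ t, p ≤ PySem.Str.lower v :=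
          fun p h v hv => hp p h v (List.mem_cons_of_mem _ hv)
        rw [ih prev ht hp']
        simp only [List.map_cons, List.mem_cons]
        constructor
        · rintro ⟨hm, hne⟩
          exact ⟨Or.inr hm, hne⟩
        · rintro ⟨hm, hne⟩
          rcases hm with rfl | hm
          · exact absurd hc.symm hne
          · exact ⟨hm, hne⟩
      · rw [if_pos (by simpa using hc)]
        have hp' : ∀ p, some (PySem.Str.lower s) = some p → ∀ v ∈ t, p ≤ PySem.Str.lower v := by
          intro p h v hv
          rw [Option.some_inj] at h; subst h; exact hle v hv
        simp only [List.map_cons, List.mem_cons]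
        rw [ih (some (PySem.Str.lower s)) ht hp']
        constructor
        · rintro (rfl | ⟨hm, hne⟩)
          · exact ⟨Or.inl rfl, fun h => hc h.symm⟩
          · refine ⟨Or.inr hm, ?_⟩
            intro h
            have hpk : ∀ p, prev = some p → p = k := by
              intro p hpe; rw [hpe] at h; exact Option.some_inj.mp h
            obtain ⟨p, hpe⟩ : ∃ p, prev = some p := Option.ne_none_iff_exists'.mp (by rw [h]; simp)
            have hk' : p = k := hpk p hpe
            rcases List.mem_map.mp hm with ⟨v, hv, rfl⟩
            have h1 : p ≤ PySem.Str.lower s := hp p hpe s List.mem_cons_self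
            have h2 : PySem.Str.lower s ≤ PySem.Str.lower v := hle v hv
            have : PySem.Str.lower s = PySem.Str.lower v :=
              le_antisymm h2 (hk' ▸ h1 : PySem.Str.lower v ≤ PySem.Str.lower s)
            exact hne (by rw [this])
        · rintro ⟨hm, hne⟩
          by_cases hk : k = PySem.Str.lower s
          · exact Or.inl hk
          · rcases hm with rfl | hm
            · exact absurd rfl hk
            · exact Or.inr ⟨hm, fun h => hk (Option.some_inj.mp h.symm)⟩

-- the lowercase keys of pvG are strictly increasing
lemma pvG_pairwise (S : List String) (prev : Option String)
    (hs : S.Pairwise (fun a b => PySem.Str.lower a ≤ PySem.Str.lower b))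
    (hp : ∀ p, prev = some p → ∀ v ∈ S, p ≤ PySem.Str.lower v) :
    ((pvG prev S).map PySem.Str.lower).Pairwise (· < ·) := by
  induction S generalizing prev with
  | nil => simp [pvG]
  | cons s t ih =>
      rw [List.pairwise_cons] at hs
      obtain ⟨hle, ht⟩ := hs
      simp only [pvG]
      by_cases hc : some (PySem.Str.lower s) = prev
      · rw [if_neg (by simpa using hc)]
        exact ih prev ht (fun p h v hv => hp p h v (List.mem_cons_of_mem _ hv))
      · rw [if_pos (by simpa using hc)]
        have hp' : ∀ p, some (PySem.Str.lower s) = some p → ∀ v ∈ t, p ≤ PySem.Str.lower v := by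
          intro p h v hv
          rw [Option.some_inj] at h; subst h; exact hle v hv
        simp only [List.map_cons]
        refine List.Pairwise.cons ?_ (ih (some (PySem.Str.lower s)) ht hp')
        intro k hk
        rw [pvG_mem_key t (some (PySem.Str.lower s)) k ht hp'] at hk
        obtain ⟨hm, hne⟩ := hk
        rcases List.mem_map.mp hm with ⟨v, hv, rfl⟩
        exact lt_of_le_of_ne (hle v hv) (fun h => hne (by rw [h]))

-- main case: the two pipelines agree on a nonempty list
lemma pvMain (xs : List String) (hxs : ¬ xs = []) :
    normalized_project_skills_py (some xs) = normalized_project_skills_py_alt (some xs) := by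
  simp only [normalized_project_skills_py, normalized_project_skills_py_alt, if_neg hxs]
  rw [pvDict_eq xs PySem.Dict.empty, pvVals_eq xs [], List.nil_append,
      pvDedup_foldl (PySem.List.sorted (pvClean xs) PySem.Str.lower) [] none, List.nil_append]
  set vals := pvClean xs with hvals
  set S := PySem.List.sorted vals PySem.Str.lower with hSdef
  set d := vals.foldl (fun result s =>
      if result.contains (PySem.Str.lower s) then result
      else result.insert (PySem.Str.lower s) s) PySem.Dict.empty with hd
  have hS_pair : S.Pairwise (fun a b => PySem.Str.lower a ≤ PySem.Str.lower b) :=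
    PySem.List.sorted_pairwise vals PySem.Str.lower
  have hpnone : ∀ p, (none : Option String) = some p → ∀ v ∈ S, p ≤ PySem.Str.lower v := by
    intro p h; exact absurd h (by simp)
  have hkeys : d.keys = PySem.Set.ofList (vals.map PySem.Str.lower) := by
    rw [hd, pvDict_keys vals PySem.Dict.empty]; rfl
  have hys_pair : ((pvG none S).map PySem.Str.lower).Pairwise (· < ·) :=
    pvG_pairwise S none hS_pair hpnone
  have hys_nodup : ((pvG none S).map PySem.Str.lower).Nodup := hys_pair.imp ne_of_lt
  have hmemiff : ∀ k, k ∈ (pvG none S).map PySem.Str.lower ↔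
      k ∈ PySem.Set.ofList (vals.map PySem.Str.lower) := by
    intro k
    rw [pvG_mem_key S none k hS_pair hpnone, PySem.Set.mem_ofList]
    have hp : (S.map PySem.Str.lower).Perm (vals.map PySem.Str.lower) :=
      (PySem.List.sorted_perm vals PySem.Str.lower false).map PySem.Str.lower
    simp [hp.mem_iff]
  have hperm : ((pvG none S).map PySem.Str.lower).Perm
      (PySem.Set.ofList (vals.map PySem.Str.lower)) :=
    (List.perm_ext_iff_of_nodup hys_nodup (PySem.Set.nodup_ofList _)).mpr hmemiff
  have hsorted : PySem.List.sorted (PySem.Set.ofList (vals.map PySem.Str.lower)) (fun k => k)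
      = (pvG none S).map PySem.Str.lower :=
    PySem.List.sorted_eq_of_perm_of_pairwise_lt _ _ _ hperm (by simpa using hys_pair)
  rw [hkeys, hsorted, List.map_map]
  have hval : ∀ b ∈ pvG none S, d.getD (PySem.Str.lower b) "" = b := by
    intro b hb
    obtain ⟨-, hfind⟩ := pvG_spec S none hS_pair hpnone b hb
    have hfind' : vals.find? (fun v => PySem.Str.lower v == PySem.Str.lower b) = some b := by
      rw [← pvSorted_find? vals (PySem.Str.lower b)]; exact hfind
    rw [PySem.Dict.getD, hd, pvDict_get? vals PySem.Dict.empty (PySem.Str.lower b)]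
    have hempty : (PySem.Dict.empty : PySem.Dict String String).get? (PySem.Str.lower b) = none := rfl
    rw [hempty, Option.none_or, hfind']
    rfl
  calc (pvG none S).map ((fun k => d.getD k "") ∘ PySem.Str.lower)
      = (pvG none S).map (fun b => b) := List.map_congr_left (fun b hb => hval b hb)
    _ = pvG none S := List.map_id' _

-- ===== VERDICT (by name: the statement is the Claim_ definition above) =====
theorem normalized_project_skills_py_spec : Claim_equal_normalized_project_skills_py := by
  intro raw _
  show normalized_project_skills_py raw = normalized_project_skills_py_alt raw
  match raw with
  | none => rfl
  | some xs =>
      by_cases hxs : xs = []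
      · subst hxs; rfl
      · exact pvMain xs hxs
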